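-- pv_equiv track=rewrite | github.com/carolinaaaaa7/ATP2022 | obras22.py | inversao_estrutural
-- ===== SOURCE A (Python) =====
-- def inversao_estrutural (lista):
--     res = {}
--     for nome, _, _, _, compositores, *_ in lista:
--         if compositores in res.keys():
--             res[compositores].append(nome)
--         else:
--             res[compositores] = [nome]
--     res = sorted (res.items())
--     return res
-- ===== SOURCE B (Python) =====
-- def inversao_estrutural (lista):
--     # B: no dict — sort the distinct composers, then one filtering pass per composer.
--     composers = sorted({compositores for _, _, _, _, compositores, *_ in lista})
--     return [(c, [nome for nome, _, _, _, compositores, *_ in lista if compositores == c])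
--             for c in composers]
-- ===== Notes on version B (the rewrite author's own statement) =====
-- stated objective: simpler
-- what changed: Replaces the dict-accumulation loop plus items sort by a two-line comprehension: sort the set of distinct composers, then collect each composer's names with a filtering pass over the input.
import Mathlib
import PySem

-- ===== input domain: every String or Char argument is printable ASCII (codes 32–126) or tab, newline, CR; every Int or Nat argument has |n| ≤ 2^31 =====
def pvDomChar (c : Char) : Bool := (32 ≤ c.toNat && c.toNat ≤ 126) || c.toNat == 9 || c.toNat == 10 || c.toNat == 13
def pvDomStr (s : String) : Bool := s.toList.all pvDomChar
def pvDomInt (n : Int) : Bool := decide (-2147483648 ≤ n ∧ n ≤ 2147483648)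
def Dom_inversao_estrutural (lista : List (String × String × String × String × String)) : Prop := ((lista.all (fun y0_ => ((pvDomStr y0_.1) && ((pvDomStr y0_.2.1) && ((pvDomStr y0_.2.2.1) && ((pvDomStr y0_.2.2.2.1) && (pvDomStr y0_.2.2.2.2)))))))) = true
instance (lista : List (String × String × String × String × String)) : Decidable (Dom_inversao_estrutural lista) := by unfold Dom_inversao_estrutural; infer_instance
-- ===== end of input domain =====

-- B groups by a sorted set of composers with one filtering pass per composer instead of A's dict loop; return-value equivalence only.

-- ===== PORT A =====
def inversao_estrutural (lista : List (String × String × String × String × String)) : List (String × List String) :=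
  let res : PySem.Dict String (List String) :=
    lista.foldl (fun res t =>
      if res.contains t.2.2.2.2 then
        res.modify t.2.2.2.2 [] (fun v => v ++ [t.1])      -- res[compositores].append(nome)
      else
        res.insert t.2.2.2.2 [t.1]) PySem.Dict.empty
  PySem.List.sorted2 res.items (fun p => p.1) (fun p => p.2) false   -- sorted(res.items()): tuple comparison, key first

-- ===== PORT B =====
def inversao_estrutural_alt (lista : List (String × String × String × String × String)) : List (String × List String) :=
  let composers := PySem.List.sorted (PySem.Set.ofList (lista.map (fun t => t.2.2.2.2))) (fun c => c) false
  composers.map (fun c => (c, (lista.filter (fun t => t.2.2.2.2 == c)).map (fun t => t.1)))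

-- ===== PRECONDITION & SPEC =====
def Spec_inversao_estrutural (lista : List (String × String × String × String × String)) (out : List (String × List String)) : Prop := out = inversao_estrutural_alt lista
instance (lista : List (String × String × String × String × String)) (out : List (String × List String)) : Decidable (Spec_inversao_estrutural lista out) := by unfold Spec_inversao_estrutural; infer_instance

-- ===== CLAIM (what is proved, stated in full; the proofs are below) =====
def Claim_equal_inversao_estrutural : Prop := ∀ (lista : List (String × String × String × String × String)), Dom_inversao_estrutural lista → Spec_inversao_estrutural lista (inversao_estrutural lista)

-- ===== LEMMAS AND PROOFS =====

-- When the new element's first key differs from every key in the accumulator, the tuple-key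
-- insertion never reaches the second key, so it coincides with insertion by the first key alone.
theorem insertBy_two_eq {α κ₁ κ₂ : Type} [LinearOrder κ₁] [LT κ₂] [DecidableLT κ₂]
    (k1 : α → κ₁) (k2 : α → κ₂) (x : α) (acc : List α) (h : ∀ y ∈ acc, k1 x ≠ k1 y) :
    PySem.List.insertBy (fun a b => decide (k1 a < k1 b) || (!decide (k1 b < k1 a) && decide (k2 a < k2 b))) x acc
      = PySem.List.insertBy (fun a b => decide (k1 a < k1 b)) x acc := by
  induction acc with
  | nil => rfl
  | cons y ys ih =>
    have hxy : k1 x ≠ k1 y := h y (List.mem_cons_self ..)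
    rcases lt_trichotomy (k1 x) (k1 y) with hlt | heq | hgt
    · simp [PySem.List.insertBy, hlt]
    · exact absurd heq hxy
    · have h1 : ¬ k1 x < k1 y := not_lt_of_gt hgt
      simp [PySem.List.insertBy, h1, hgt, ih (fun y hy => h y (List.mem_cons_of_mem _ hy))]

theorem foldl_insertBy_two_eq {α κ₁ κ₂ : Type} [LinearOrder κ₁] [LT κ₂] [DecidableLT κ₂]
    (k1 : α → κ₁) (k2 : α → κ₂) (xs acc : List α)
    (hacc : ∀ x ∈ xs, ∀ y ∈ acc, k1 x ≠ k1 y) (hnd : (xs.map k1).Nodup) :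
    xs.foldl (fun acc x => PySem.List.insertBy (fun a b => decide (k1 a < k1 b) || (!decide (k1 b < k1 a) && decide (k2 a < k2 b))) x acc) acc
      = xs.foldl (fun acc x => PySem.List.insertBy (fun a b => decide (k1 a < k1 b)) x acc) acc := by
  induction xs generalizing acc with
  | nil => rfl
  | cons x xs ih =>
    simp only [List.foldl_cons]
    rw [insertBy_two_eq k1 k2 x acc (hacc x (List.mem_cons_self ..))]
    apply ih
    · intro z hz y hy
      rcases (PySem.List.mem_insertBy _ _ _ _).mp hy with rfl | hy'
      · have hnd' := hnd
        simp only [List.map_cons, List.nodup_cons] at hnd'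
        intro hc
        exact hnd'.1 (hc ▸ List.mem_map_of_mem hz)
      · exact hacc z (List.mem_cons_of_mem _ hz) y hy'
    · simp only [List.map_cons, List.nodup_cons] at hnd
      exact hnd.2

-- sorted with a tuple key (k1, k2) equals sorted by k1 when the k1 values are pairwise distinct.
theorem sorted2_eq_sorted {α κ₁ κ₂ : Type} [LinearOrder κ₁] [LT κ₂] [DecidableLT κ₂]
    (xs : List α) (k1 : α → κ₁) (k2 : α → κ₂) (hnd : (xs.map k1).Nodup) :
    PySem.List.sorted2 xs k1 k2 false = PySem.List.sorted xs k1 false := by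
  simp only [PySem.List.sorted2, PySem.List.sorted]
  exact foldl_insertBy_two_eq k1 k2 xs [] (by simp) hnd

-- A's dict loop, characterised: its items are the first-occurrence composers paired with their names.
theorem dict_items_char (lista : List (String × String × String × String × String)) :
    (lista.foldl (fun res t =>
      if res.contains t.2.2.2.2 then
        res.modify t.2.2.2.2 [] (fun v => v ++ [t.1])
      else
        res.insert t.2.2.2.2 [t.1]) (PySem.Dict.empty : PySem.Dict String (List String))).items
    = (PySem.Set.ofList (lista.map (fun t => t.2.2.2.2))).map
        (fun c => (c, (lista.filter (fun t => t.2.2.2.2 == c)).map (fun t => t.1))) := by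
  have hstep : (fun (res : PySem.Dict String (List String)) (t : String × String × String × String × String) =>
      if res.contains t.2.2.2.2 then res.modify t.2.2.2.2 [] (fun v => v ++ [t.1])
      else res.insert t.2.2.2.2 [t.1])
      = fun res t => res.modify t.2.2.2.2 [] (fun v => v ++ [t.1]) := by
    funext res t
    by_cases hc : res.contains t.2.2.2.2
    · simp [hc]
    · simp only [Bool.not_eq_true] at hc
      simp [hc, PySem.Dict.modify, PySem.Dict.getD_of_not_contains res [] hc]
  rw [hstep]
  have hfold : lista.foldl (fun res t => res.modify t.2.2.2.2 [] (fun v => v ++ [t.1]))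
        (PySem.Dict.empty : PySem.Dict String (List String))
      = (lista.map (fun t => (t.2.2.2.2, t.1))).foldl (fun res p => res.modify p.1 [] (fun v => v ++ [p.2]))
        PySem.Dict.empty := by
    rw [List.foldl_map]
  rw [hfold]
  set l := lista.map (fun t => (t.2.2.2.2, t.1)) with hl
  have hnodup : ((l.foldl (fun res p => res.modify p.1 [] (fun v => v ++ [p.2])) (PySem.Dict.empty : PySem.Dict String (List String)))).keys.Nodup := by
    exact PySem.Dict.nodup_keys_foldl_modify_key l (fun p => p.1) [] (fun _ p v => v ++ [p.2]) PySem.Dict.empty (by simp)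
  rw [PySem.Dict.items_eq_map_keys _ hnodup []]
  have hkeys : ((l.foldl (fun res p => res.modify p.1 [] (fun v => v ++ [p.2])) (PySem.Dict.empty : PySem.Dict String (List String)))).keys
      = PySem.Set.ofList (lista.map (fun t => t.2.2.2.2)) := by
    rw [PySem.Dict.keys_foldl_modify_key l (fun p => p.1) [] (fun d p v => v ++ [p.2])]
    simp [hl, PySem.Set.update, PySem.Set.ofList_eq_foldl, List.map_map, Function.comp_def]
  rw [hkeys]
  apply List.map_congr_left
  intro c _
  rw [PySem.Dict.getD_foldl_modify_append l PySem.Dict.empty c]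
  simp [hl, PySem.Dict.getD_empty, List.filter_map, List.map_map, Function.comp_def]

-- ===== VERDICT (by name: the statement is the Claim_ definition above) =====
theorem inversao_estrutural_spec : Claim_equal_inversao_estrutural := by
  intro lista _
  show inversao_estrutural lista = inversao_estrutural_alt lista
  have hA : inversao_estrutural lista
      = PySem.List.sorted2 ((lista.foldl (fun res t =>
          if res.contains t.2.2.2.2 then res.modify t.2.2.2.2 [] (fun v => v ++ [t.1])
          else res.insert t.2.2.2.2 [t.1]) (PySem.Dict.empty : PySem.Dict String (List String))).items)
          (fun p => p.1) (fun p => p.2) false := rfl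
  have hB : inversao_estrutural_alt lista
      = (PySem.List.sorted (PySem.Set.ofList (lista.map (fun t => t.2.2.2.2))) (fun c => c) false).map
          (fun c => (c, (lista.filter (fun t => t.2.2.2.2 == c)).map (fun t => t.1))) := rfl
  rw [hA, hB, dict_items_char lista]
  set K := PySem.Set.ofList (lista.map (fun t => t.2.2.2.2)) with hK
  set g := fun c => (c, (lista.filter (fun t => t.2.2.2.2 == c)).map (fun t => t.1)) with hg
  have hfst : (K.map g).map (fun p => p.1) = K := by
    simp [hg, List.map_map, Function.comp_def]
  have hnd : ((K.map g).map (fun p : String × List String => p.1)).Nodup := by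
    rw [hfst]; exact PySem.Set.nodup_ofList _
  rw [sorted2_eq_sorted (K.map g) (fun p => p.1) (fun p => p.2) hnd]
  apply PySem.List.sorted_eq_of_perm_of_pairwise_lt
  · exact (PySem.List.sorted_perm K (fun c => c) false).map g
  · rw [List.pairwise_map]
    exact PySem.List.sorted_ofList_pairwise_lt _
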